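-- pv_equiv track=rewrite | github.com/jwsong0617/problem_solving | programmers_모의고사.py | solution
-- ===== SOURCE A (Python) =====
-- def submit(question_nums,answers,submit_pattern):
--     correct_num = 0
--     submit_pattern_len = len(submit_pattern)
--     for i in range(1,question_nums+1):
--         if(i%submit_pattern_len==0):
--             if(answers[i-1]==submit_pattern[-1]):
--                 correct_num+=1
--             continue
--         if(submit_pattern[(i%submit_pattern_len)-1]==answers[i-1]):
--             correct_num+=1
--     return correct_num
--
-- def solution(answers):
--     answer = []
--     question_nums = len(answers)
--     submit1 = [1,2,3,4,5]
--     submit2 = [2,1,2,3,2,4,2,5]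
--     submit3 = [3,3,1,1,2,2,4,4,5,5]
--     s1_num = submit(question_nums,answers,submit1)
--     s2_num = submit(question_nums,answers,submit2)
--     s3_num = submit(question_nums,answers,submit3)
--     answer = [(1,s1_num),(2,s2_num),(3,s3_num)]
--     max_correct_num = max(answer, key=lambda x:x[1])[1]
--     answer = [x[0] for x in answer if x[1]==max_correct_num]
--     answer.sort()
--     return answer
-- ===== SOURCE B (Python) =====
-- def solution(answers):
--     # Bucket-count answers by residue class mod 40 (lcm of the pattern periods),
--     # then score each pattern by a 40-entry table lookup instead of comparing
--     # every answer against every pattern.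
--     patterns = [[1, 2, 3, 4, 5], [2, 1, 2, 3, 2, 4, 2, 5], [3, 3, 1, 1, 2, 2, 4, 4, 5, 5]]
--     hist = {}
--     for i, a in enumerate(answers):
--         k = (i % 40, a)
--         hist[k] = hist.get(k, 0) + 1
--     scores = []
--     for p in patterns:
--         s = 0
--         for r in range(40):
--             s += hist.get((r, p[r % len(p)]), 0)
--         scores.append(s)
--     m = max(scores)
--     return [k + 1 for k in range(3) if scores[k] == m]
-- ===== Notes on version B (the rewrite author's own statement) =====
-- stated objective: alternative
-- what changed: A compares every answer against each of the three cyclic patterns in three separate passes; B never compares an answer to a pattern element during its pass: it builds one histogram keyed by (position mod 40, answer value) in a single pass, then computes each pattern's score afterwards by 40 table lookups (40 = lcm of the pattern periods), and selects the winners by index.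
import Mathlib
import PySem

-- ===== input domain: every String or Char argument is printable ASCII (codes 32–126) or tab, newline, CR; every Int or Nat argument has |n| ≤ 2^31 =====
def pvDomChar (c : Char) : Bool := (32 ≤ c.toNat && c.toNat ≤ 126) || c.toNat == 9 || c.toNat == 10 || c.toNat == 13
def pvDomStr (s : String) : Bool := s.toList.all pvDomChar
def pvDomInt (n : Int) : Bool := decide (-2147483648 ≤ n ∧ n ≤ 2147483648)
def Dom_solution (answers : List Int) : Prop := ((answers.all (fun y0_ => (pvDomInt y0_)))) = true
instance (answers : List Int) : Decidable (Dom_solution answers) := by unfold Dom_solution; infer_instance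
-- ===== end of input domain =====

-- B replaces A's three comparison passes (one `submit` call per pattern) by a histogram keyed by
-- (position mod 40, answer value) built in one pass, scoring each pattern afterwards by 40 table
-- lookups (40 = lcm of the pattern periods). Objective: alternative algorithm, same asymptotic cost.

-- ===== PORT A =====
def submit (question_nums : Int) (answers : List Int) (submit_pattern : List Int) : Int :=
  let submit_pattern_len : Int := submit_pattern.length
  (PySem.List.pyRange 1 (question_nums + 1) 1).foldl
    (fun correct_num i =>
      if PySem.Int.mod i submit_pattern_len = 0 then
        -- in-range access: 1 ≤ i ≤ question_nums = len answers, pattern nonempty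
        if PySem.List.pyGetD answers (i - 1) 0 = PySem.List.pyGetD submit_pattern (-1) 0 then
          correct_num + 1
        else correct_num
      else
        if PySem.List.pyGetD submit_pattern (PySem.Int.mod i submit_pattern_len - 1) 0
            = PySem.List.pyGetD answers (i - 1) 0 then
          correct_num + 1
        else correct_num)
    0

def solution (answers : List Int) : List Int :=
  let question_nums : Int := answers.length
  let submit1 : List Int := [1, 2, 3, 4, 5]
  let submit2 : List Int := [2, 1, 2, 3, 2, 4, 2, 5]
  let submit3 : List Int := [3, 3, 1, 1, 2, 2, 4, 4, 5, 5]
  let s1_num := submit question_nums answers submit1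
  let s2_num := submit question_nums answers submit2
  let s3_num := submit question_nums answers submit3
  let answer : List (Int × Int) := [(1, s1_num), (2, s2_num), (3, s3_num)]
  -- max(answer, key=lambda x: x[1])[1]; `answer` is nonempty so max? is some
  let max_correct_num := ((PySem.List.max? answer (fun x => x.2)).getD (0, 0)).2
  let answer2 := (answer.filter (fun x => x.2 == max_correct_num)).map (fun x => x.1)
  PySem.List.sorted answer2 (fun x => x) false

-- ===== PORT B =====
def solution_alt (answers : List Int) : List Int :=
  let patterns : List (List Int) := [[1,2,3,4,5], [2,1,2,3,2,4,2,5], [3,3,1,1,2,2,4,4,5,5]]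
  -- hist[k] = hist.get(k, 0) + 1  is exactly Dict.modify k 0 (· + 1)
  let hist : PySem.Dict (Int × Int) Int :=
    (PySem.List.enumerate answers).foldl
      (fun d ia => d.modify (PySem.Int.mod ia.1 40, ia.2) 0 (· + 1)) PySem.Dict.empty
  let scores : List Int := patterns.foldl
    (fun scores p =>
      scores ++ [(PySem.List.pyRange 0 40 1).foldl
        (fun s r => s + hist.getD (r, PySem.List.pyGetD p (PySem.Int.mod r (p.length : Int)) 0) 0) 0])
    []
  let m : Int := (PySem.List.max? scores (fun x => x)).getD 0
  ((PySem.List.pyRange 0 3 1).filter (fun k => PySem.List.pyGetD scores k 0 == m)).map (fun k => k + 1)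

-- ===== PRECONDITION & SPEC =====
def Spec_solution (answers : List Int) (out : List Int) : Prop := out = solution_alt answers
instance (answers : List Int) (out : List Int) : Decidable (Spec_solution answers out) := by unfold Spec_solution; infer_instance

-- ===== CLAIM (what is proved, stated in full; the proofs are below) =====
def Claim_equal_solution : Prop := ∀ (answers : List Int), Dom_solution answers → Spec_solution answers (solution answers)

-- ===== LEMMAS AND PROOFS =====

-- common spec: number of positions (counted from start index k) where the answer matches p[idx % len p]
def cnt (p : List Int) : List Int → Nat → Int
  | [], _ => 0
  | a :: rest, k => (if a = p.getD (k % p.length) 0 then 1 else 0) + cnt p rest (k + 1)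

-- ---- A-side: submit computes cnt ----

-- successor of an index modulo the pattern length (needs 1 < L so that 1 % L = 1)
theorem succ_mod (L j : Nat) (hL : 1 < L) :
    ((j + 1) % L = 0 ∧ j % L = L - 1) ∨ ((j + 1) % L = j % L + 1) := by
  have h1 : (j + 1) % L = (j % L + 1) % L := by
    rw [Nat.add_mod, Nat.mod_eq_of_lt hL]
  have hj : j % L < L := Nat.mod_lt _ (by omega)
  by_cases h : j % L = L - 1
  · left
    refine ⟨?_, h⟩
    rw [h1, h, show L - 1 + 1 = L by omega, Nat.mod_self]
  · right
    rw [h1, Nat.mod_eq_of_lt (by omega)]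

theorem range_fold_cnt (p : List Int) (ans : List Int) :
    ∀ (k : Nat) (c : Int),
    (List.range ans.length).foldl
      (fun c j => if ans.getD j 0 = p.getD ((k + j) % p.length) 0 then c + 1 else c) c
    = c + cnt p ans k := by
  induction ans with
  | nil => intro k c; simp [cnt]
  | cons a rest ih =>
    intro k c
    rw [show (a :: rest).length = rest.length + 1 from rfl, List.range_succ_eq_map,
      List.foldl_cons, List.foldl_map]
    rw [PySem.List.foldl_congr_mem _ _
      (fun c j => if rest.getD j 0 = p.getD ((k + 1 + j) % p.length) 0 then c + 1 else c) _
      (by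
        intro acc j _
        rw [show k + j.succ = k + 1 + j by omega]
        rw [show (a :: rest).getD j.succ 0 = rest.getD j 0 from List.getD_cons_succ])]
    rw [ih (k + 1)]
    simp only [cnt, Nat.add_zero, List.getD_cons_zero]
    split_ifs <;> omega

theorem submit_eq_cnt (p : List Int) (hp : 1 < p.length) (ans : List Int) :
    submit (ans.length : Int) ans p = cnt p ans 0 := by
  have hp0 : p ≠ [] := by intro h; rw [h] at hp; simp at hp
  simp only [submit]
  rw [PySem.List.pyRange_one]
  rw [show ((ans.length : Int) + 1 - 1).toNat = ans.length by omega]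
  rw [List.foldl_map]
  rw [PySem.List.foldl_congr_mem _ _
    (fun c j => if ans.getD j 0 = p.getD ((0 + j) % p.length) 0 then c + 1 else c) _
    (by
      intro acc j _
      rw [show (1 : Int) + (j : Int) = ((j + 1 : Nat) : Int) by push_cast; ring]
      rw [show ((j + 1 : Nat) : Int) - 1 = ((j : Nat) : Int) by push_cast; ring]
      rw [PySem.Int.mod_natCast, PySem.List.pyGetD_natCast]
      simp only [Nat.zero_add]
      rcases succ_mod p.length j hp with ⟨h0, hj⟩ | hs
      · rw [h0]
        simp only [Nat.cast_zero, if_true]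
        rw [PySem.List.pyGetD_neg_one p 0 hp0, List.getLast_eq_getElem hp0, hj]
        rw [List.getD_eq_getElem p 0 (show p.length - 1 < p.length by omega)]
      · rw [hs]
        have hne : (((j % p.length + 1 : Nat) : Int)) ≠ 0 := by
          push_cast; omega
        rw [if_neg hne]
        rw [show (((j % p.length + 1 : Nat) : Int)) - 1 = ((j % p.length : Nat) : Int) by push_cast; ring]
        rw [PySem.List.pyGetD_natCast]
        simp only [eq_comm])]
  simpa using range_fold_cnt p ans 0 0

-- ---- B-side: the histogram lookup is a count over the key list ----

theorem hist_getD (ans : List Int) (k : Int × Int) :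
    ((PySem.List.enumerate ans).foldl
        (fun d ia => d.modify (PySem.Int.mod ia.1 40, ia.2) 0 (· + 1)) PySem.Dict.empty).getD k 0
    = (((PySem.List.enumerate ans).map (fun ia => (PySem.Int.mod ia.1 40, ia.2))).count k : Int) := by
  rw [← List.foldl_map (f := fun ia : Int × Int => (PySem.Int.mod ia.1 40, ia.2))
      (g := fun (d : PySem.Dict (Int × Int) Int) x => d.modify x 0 (· + 1))]
  rw [PySem.Dict.getD_foldl_modify_add_one]
  simp [PySem.Dict.getD, PySem.Dict.get?, PySem.Dict.empty]

-- sum over the 40 residues of the indicator "(r, t r) = k" collapses to one test on k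
theorem indicator_sum (t : Int → Int) (k : Int × Int) (h0 : 0 ≤ k.1) (h1 : k.1 < 40) :
    ((PySem.List.pyRange 0 40 1).map (fun r => if (r, t r) = k then (1 : Int) else 0)).sum
    = if k.2 = t k.1 then 1 else 0 := by
  by_cases h : k.2 = t k.1
  · have he : (fun r : Int => if (r, t r) = k then (1 : Int) else 0)
        = fun r => if r = k.1 then (1 : Int) else 0 := by
      funext r
      congr 1
      simp only [eq_iff_iff, Prod.ext_iff]
      constructor
      · rintro ⟨h1', _⟩; exact h1'
      · rintro rfl; exact ⟨rfl, h.symm⟩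
    rw [he, if_pos h]
    have : ((PySem.List.pyRange 0 40 1).map (fun r => if decide (r = k.1) = true then (1 : Int) else 0)).sum
        = ((PySem.List.pyRange 0 40 1).countP (fun r => decide (r = k.1)) : Int) :=
      PySem.List.sum_map_ite_one_zero _ _
    simp only [decide_eq_true_eq] at this
    rw [this]
    have hmem : k.1 ∈ PySem.List.pyRange 0 40 1 := by
      rw [PySem.List.mem_pyRange_one]; omega
    have hcount : (PySem.List.pyRange 0 40 1).countP (fun r => decide (r = k.1)) = 1 := by
      have : (PySem.List.pyRange 0 40 1).countP (fun r => decide (r = k.1))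
          = (PySem.List.pyRange 0 40 1).count k.1 := by
        simp only [List.count]
        refine List.countP_congr ?_
        intro x _
        simp [@eq_comm _ x]
      rw [this]
      exact List.count_eq_one_of_mem (PySem.List.nodup_pyRange_one 0 40) hmem
    rw [hcount]; rfl
  · have he : (fun r : Int => if (r, t r) = k then (1 : Int) else 0)
        = fun _ => (0 : Int) := by
      funext r
      rw [if_neg]
      intro hrk
      have hr : r = k.1 := congrArg Prod.fst hrk
      have ht : t r = k.2 := congrArg Prod.snd hrk
      exact h (by rw [← ht, hr])
    rw [he, if_neg h]
    simp

theorem sum_count_eq_countP (t : Int → Int) (ks : List (Int × Int))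
    (hks : ∀ k ∈ ks, 0 ≤ k.1 ∧ k.1 < 40) :
    ((PySem.List.pyRange 0 40 1).map (fun r => (ks.count (r, t r) : Int))).sum
    = (ks.countP (fun k => k.2 == t k.1) : Int) := by
  induction ks with
  | nil =>
    simp only [List.count_nil, List.countP_nil, Nat.cast_zero, List.map_const', List.sum_replicate,
      smul_zero]
  | cons k ks ih =>
    have hk := hks k (List.mem_cons_self)
    have hrest : ∀ k' ∈ ks, 0 ≤ k'.1 ∧ k'.1 < 40 := fun k' hk' => hks k' (List.mem_cons_of_mem _ hk')
    rw [List.countP_cons]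
    push_cast
    calc ((PySem.List.pyRange 0 40 1).map (fun r => ((k :: ks).count (r, t r) : Int))).sum
        = ((PySem.List.pyRange 0 40 1).map
            (fun r => (ks.count (r, t r) : Int) + if (r, t r) = k then (1 : Int) else 0)).sum := by
          refine congrArg List.sum (List.map_congr_left ?_)
          intro r _
          rw [List.count_cons]
          push_cast
          congr 1
          simp only [beq_iff_eq]
          exact if_congr eq_comm rfl rfl
      _ = ((PySem.List.pyRange 0 40 1).map (fun r => (ks.count (r, t r) : Int))).sum
          + ((PySem.List.pyRange 0 40 1).map (fun r => if (r, t r) = k then (1 : Int) else 0)).sum :=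
          PySem.List.sum_map_add_int _ _ _
      _ = (ks.countP (fun k => k.2 == t k.1) : Int) + if k.2 = t k.1 then 1 else 0 := by
          rw [ih hrest, indicator_sum t k hk.1 hk.2]
      _ = _ := by
          simp only [beq_iff_eq]

-- the per-pattern score of the key list is cnt
theorem countP_key (p : List Int) (hdvd : p.length ∣ 40) (ans : List Int) :
    ∀ n : Nat,
    (((PySem.List.enumerate ans (n : Int)).map (fun ia => (PySem.Int.mod ia.1 40, ia.2))).countP
        (fun k => k.2 == PySem.List.pyGetD p (PySem.Int.mod k.1 (p.length : Int)) 0) : Int)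
    = cnt p ans n := by
  induction ans with
  | nil => intro n; simp [PySem.List.enumerate_nil, cnt]
  | cons a rest ih =>
    intro n
    rw [PySem.List.enumerate_cons, List.map_cons, List.countP_cons]
    have hkey : PySem.Int.mod ((n : Int)) 40 = ((n % 40 : Nat) : Int) := PySem.Int.mod_natCast n 40
    have hmod : PySem.Int.mod ((n % 40 : Nat) : Int) ((p.length : Nat) : Int)
        = ((n % p.length : Nat) : Int) := by
      rw [PySem.Int.mod_natCast, Nat.mod_mod_of_dvd n hdvd]
    have ih' := ih (n + 1)
    push_cast at ih' ⊢
    rw [ih']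
    simp only [hkey, hmod, PySem.List.pyGetD_natCast, beq_iff_eq, cnt]
    split_ifs <;> omega

-- every key produced by the histogram pass has residue component in [0, 40)
theorem keys_bounded (ans : List Int) (s : Int) :
    ∀ k ∈ (PySem.List.enumerate ans s).map (fun ia => (PySem.Int.mod ia.1 40, ia.2)),
      0 ≤ k.1 ∧ k.1 < 40 := by
  intro k hk
  rcases List.mem_map.mp hk with ⟨ia, _, rfl⟩
  exact ⟨PySem.Int.mod_nonneg _ (by omega), PySem.Int.mod_lt _ (by omega)⟩

-- B's score loop for pattern p computes cnt p ans 0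
theorem score_eq_cnt (p : List Int) (hdvd : p.length ∣ 40) (ans : List Int) :
    (PySem.List.pyRange 0 40 1).foldl
      (fun s r => s +
        (((PySem.List.enumerate ans).foldl
            (fun d ia => d.modify (PySem.Int.mod ia.1 40, ia.2) 0 (· + 1)) PySem.Dict.empty)).getD
          (r, PySem.List.pyGetD p (PySem.Int.mod r (p.length : Int)) 0) 0) 0
    = cnt p ans 0 := by
  simp only [hist_getD]
  rw [PySem.List.foldl_add]
  rw [sum_count_eq_countP _ _ (keys_bounded ans 0)]
  have := countP_key p hdvd ans 0
  simp only [Nat.cast_zero] at this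
  rw [this]
  ring

-- both selection tails produce the winners filtered from [(1,a),(2,b),(3,c)] by the max score
theorem tailA_eq (a b c : Int) :
    PySem.List.sorted
      ((([((1:Int), a), (2, b), (3, c)]).filter
          (fun x => x.2 == ((PySem.List.max? [((1:Int), a), (2, b), (3, c)] (fun x => x.2)).getD (0, 0)).2)).map
        (fun x => x.1)) (fun x => x) false
    = (([((1:Int), a), (2, b), (3, c)]).filter (fun kv => kv.2 == max a (max b c))).map (fun kv => kv.1) := by
  obtain ⟨mp, hmp⟩ : ∃ mp, PySem.List.max? [((1:Int), a), (2, b), (3, c)] (fun x => x.2) = some mp := by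
    cases h : PySem.List.max? [((1:Int), a), (2, b), (3, c)] (fun x => x.2) with
    | none => rw [PySem.List.max?_eq_none_iff] at h; simp at h
    | some m => exact ⟨m, rfl⟩
  have hmem := PySem.List.max?_mem hmp
  have hmax := PySem.List.max?_isMax hmp
  have h1 : a ≤ mp.2 := hmax (1, a) (by simp)
  have h2 : b ≤ mp.2 := hmax (2, b) (by simp)
  have h3 : c ≤ mp.2 := hmax (3, c) (by simp)
  have hM : mp.2 = max a (max b c) := by
    simp only [List.mem_cons, List.not_mem_nil, or_false] at hmem
    rcases hmem with h | h | h <;> rw [h] at h1 h2 h3 <;> rw [h]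
    · exact (max_eq_left (max_le h2 h3)).symm
    · rw [max_eq_left h3, max_eq_right h1]
    · rw [max_eq_right h2, max_eq_right h1]
  rw [hmp]
  simp only [Option.getD_some, hM]
  refine PySem.List.sorted_eq_of_perm_of_pairwise_lt _ _ _ (List.Perm.refl _) ?_
  have hsub := (List.filter_sublist
    (l := [((1:Int), a), (2, b), (3, c)])
    (p := fun x : Int × Int => x.2 == max a (max b c))).map
    (fun x : Int × Int => x.1)
  exact (show List.Pairwise (· < ·) [(1:Int), 2, 3] by decide).sublist hsub

theorem tailB_eq (a b c : Int) :
    ((PySem.List.pyRange 0 3 1).filter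
        (fun k => PySem.List.pyGetD [a, b, c] k 0 == (PySem.List.max? [a, b, c] (fun x => x)).getD 0)).map
      (fun k => k + 1)
    = (([((1:Int), a), (2, b), (3, c)]).filter (fun kv => kv.2 == max a (max b c))).map (fun kv => kv.1) := by
  obtain ⟨mv, hmv⟩ : ∃ mv, PySem.List.max? [a, b, c] (fun x => x) = some mv := by
    cases h : PySem.List.max? [a, b, c] (fun x => x) with
    | none => rw [PySem.List.max?_eq_none_iff] at h; simp at h
    | some m => exact ⟨m, rfl⟩
  have hmem := PySem.List.max?_mem hmv
  have hmax := PySem.List.max?_isMax hmv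
  have h1 : a ≤ mv := hmax a (by simp)
  have h2 : b ≤ mv := hmax b (by simp)
  have h3 : c ≤ mv := hmax c (by simp)
  have hM : mv = max a (max b c) := by
    simp only [List.mem_cons, List.not_mem_nil, or_false] at hmem
    rcases hmem with h | h | h <;> rw [h] at h1 h2 h3 <;> rw [h]
    · exact (max_eq_left (max_le h2 h3)).symm
    · rw [max_eq_left h3, max_eq_right h1]
    · rw [max_eq_right h2, max_eq_right h1]
  rw [hmv]
  simp only [Option.getD_some, hM]
  rw [show PySem.List.pyRange 0 3 1 = [0, 1, 2] from by decide]
  simp only [List.filter]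
  norm_num [PySem.List.pyGetD]
  cases ha : (a == max a (max b c)) <;> cases hb : (b == max a (max b c)) <;>
    cases hc : (c == max a (max b c)) <;> simp [hc]

-- ===== VERDICT (by name: the statement is the Claim_ definition above) =====
theorem solution_spec : Claim_equal_solution := by
  intro answers _
  unfold Spec_solution solution solution_alt
  simp only [List.foldl_cons, List.foldl_nil, List.nil_append, List.cons_append]
  rw [score_eq_cnt [1,2,3,4,5] (by decide) answers,
    score_eq_cnt [2,1,2,3,2,4,2,5] (by decide) answers,
    score_eq_cnt [3,3,1,1,2,2,4,4,5,5] (by decide) answers]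
  rw [submit_eq_cnt [1,2,3,4,5] (by decide) answers,
    submit_eq_cnt [2,1,2,3,2,4,2,5] (by decide) answers,
    submit_eq_cnt [3,3,1,1,2,2,4,4,5,5] (by decide) answers]
  rw [tailA_eq, tailB_eq]
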